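-- pv_equiv track=rewrite | github.com/phetdam/daily-coding-problem | legacy/max_rect.py | max_rect
-- ===== SOURCE A (Python) =====
-- def max_rect(mat):
--     """
--     given a matrix, search for starting points (1s) that have not been visited
--     and then find the largest connected component of 1s. take the max for each
--     of these areas (running max) and we have our answer.
--     """
--     if mat is None: return 0
--     # get dimensions of mat
--     nrow = len(mat)
--     ncol = len(mat[0])
--     # running max of area
--     maxa = 0
--     # visited matrix
--     visited = [[False for _ in range(ncol)] for _ in range(nrow)]
--     # for each (r, c) cell
--     for r in range(nrow):
--         for c in range(ncol):
--             # if (r, c) is 1, and not visited, then we have a starting point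
--             if (mat[r][c] == 1) and (visited[r][c] == False):
--                 # queue for bfs
--                 queue = [(r, c)]
--                 # mark as visited
--                 visited[r][c] = True
--                 # number of 1s in this connected component
--                 area = 0
--                 # while queue is not empty
--                 while len(queue) > 0:
--                     # get row and column
--                     row, col = queue.pop(0)
--                     # add 1 to area
--                     area = area + 1
--                     # add all neighbors that are within the matrix and 1s and
--                     # have not been visited; also mark as visited
--                     if (row < nrow - 1) and (mat[row + 1][col] == 1) and \
--                        visited[row + 1][col] == False:
--                         queue.append((row + 1, col))
--                         visited[row + 1][col] = True
--                     if (row > 0) and (mat[row - 1][col] == 1) and \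
--                        visited[row - 1][col] == False:
--                         queue.append((row - 1, col))
--                         visited[row - 1][col] = True
--                     if (col < ncol - 1) and (mat[row][col + 1] == 1) and \
--                        visited[row][col + 1] == False:
--                         queue.append((row, col + 1))
--                         visited[row][col + 1] = True
--                     if (col > 0) and (mat[row][col - 1] == 1) and \
--                        visited[row][col - 1] == False:
--                         queue.append((row, col - 1))
--                         visited[row][col - 1] = True
--                 # after the traversal, take max with maxa
--                 maxa = max(maxa, area)
--     # return maxa
--     return maxa
-- ===== SOURCE B (Python) =====
-- def max_rect(mat):
--     """Largest connected (4-neighbour) component of 1s, by per-component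
--     fixpoint saturation of a cell set instead of a BFS queue."""
--     if mat is None: return 0
--     nrow = len(mat)
--     ncol = len(mat[0])
--     best = 0
--     done = set()
--     for r in range(nrow):
--         for c in range(ncol):
--             if mat[r][c] == 1 and (r, c) not in done:
--                 comp = {(r, c)}
--                 while True:
--                     nxt = comp | {(rr, cc)
--                                   for (x, y) in comp
--                                   for (rr, cc) in ((x + 1, y), (x - 1, y), (x, y + 1), (x, y - 1))
--                                   if 0 <= rr < nrow and 0 <= cc < ncol and mat[rr][cc] == 1}
--                     if nxt == comp:
--                         break
--                     comp = nxt
--                 done |= comp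
--                 best = max(best, len(comp))
--     return best
-- ===== Notes on version B (the rewrite author's own statement) =====
-- stated objective: alternative
-- what changed: A's per-component BFS (FIFO queue popped with pop(0) plus a boolean visited matrix) is replaced by per-component fixpoint saturation: the component set is repeatedly unioned with all in-bounds 1-neighbours of its cells until it stops growing, and a done-set replaces the visited matrix.
import Mathlib
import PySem

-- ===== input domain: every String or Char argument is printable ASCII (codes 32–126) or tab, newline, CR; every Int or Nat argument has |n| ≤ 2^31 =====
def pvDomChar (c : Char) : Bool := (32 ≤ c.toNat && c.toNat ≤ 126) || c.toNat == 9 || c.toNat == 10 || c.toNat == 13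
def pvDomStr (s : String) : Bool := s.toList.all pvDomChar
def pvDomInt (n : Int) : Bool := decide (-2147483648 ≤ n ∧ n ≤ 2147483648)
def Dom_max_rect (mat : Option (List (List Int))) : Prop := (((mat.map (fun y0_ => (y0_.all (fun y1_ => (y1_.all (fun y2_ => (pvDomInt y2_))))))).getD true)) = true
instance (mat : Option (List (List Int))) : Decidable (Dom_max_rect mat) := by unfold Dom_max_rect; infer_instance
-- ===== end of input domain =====

-- B replaces A's BFS-queue flood fill (visited matrix + FIFO queue popped with pop(0)) by
-- per-component fixpoint saturation of a cell set; objective: alternative (same exact results).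

-- ===== PORT A =====

-- mat[r][c] == 1. Indices are Nat because every index A reads is guarded nonnegative;
-- out of range gives false where Python would raise IndexError (such inputs are excluded by Pre_).
def matOne (m : List (List Int)) (r c : Nat) : Bool :=
  match m[r]? with
  | some row => row[c]? == some 1
  | none => false

-- one of A's four guarded enqueue-and-mark statements ("if cond and not visited: append, mark")
def push (c : Prop) [Decidable c] (y : Nat × Nat)
    (st : List (Nat × Nat) × Finset (Nat × Nat)) : List (Nat × Nat) × Finset (Nat × Nat) :=
  if c ∧ y ∉ st.2 then (st.1 ++ [y], insert y st.2) else st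

-- A's inner `while len(queue) > 0` BFS loop. Python's `visited` bool matrix is ported as the
-- Finset of marked coordinates (it is only read via membership tests — exact), and the unbounded
-- while-loop gets a fuel argument to be structural; 2*nrow*ncol+1 is proved sufficient below.
def bfsLoop (m : List (List Int)) (nrow ncol : Nat) :
    Nat → List (Nat × Nat) → Finset (Nat × Nat) → Int → Finset (Nat × Nat) × Int
  | 0, _, v, area => (v, area)
  | _ + 1, [], v, area => (v, area)
  | f + 1, (row, col) :: q, v, area =>
    let p1 := push (row < nrow - 1 ∧ matOne m (row + 1) col) (row + 1, col) (q, v)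
    let p2 := push (0 < row ∧ matOne m (row - 1) col) (row - 1, col) p1
    let p3 := push (col < ncol - 1 ∧ matOne m row (col + 1)) (row, col + 1) p2
    let p4 := push (0 < col ∧ matOne m row (col - 1)) (row, col - 1) p3
    bfsLoop m nrow ncol f p4.1 p4.2 (area + 1)

-- body of A's nested `for r / for c` loop; state = (visited, maxa)
def cellA (m : List (List Int)) (nrow ncol : Nat)
    (st : Finset (Nat × Nat) × Int) (r c : Nat) : Finset (Nat × Nat) × Int :=
  if matOne m r c ∧ (r, c) ∉ st.1 then
    let res := bfsLoop m nrow ncol (2 * (nrow * ncol) + 1) [(r, c)] (insert (r, c) st.1) 0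
    (res.1, max st.2 res.2)
  else st

def max_rect (mat : Option (List (List Int))) : Int :=
  match mat with
  | none => 0
  | some m =>
    let nrow := m.length
    let ncol := (m.headD []).length
    ((List.range nrow).foldl
      (fun st r => (List.range ncol).foldl (fun st c => cellA m nrow ncol st r c) st)
      (∅, 0)).2

-- ===== PORT B =====

-- the four neighbour candidates of (x, y) that pass B's bounds filter
-- (0 <= rr < nrow and 0 <= cc < ncol; the `0 <` guards are Python's `0 <=` on the int candidates)
def nbrs (nrow ncol x y : Nat) : List (Nat × Nat) :=
  (if x + 1 < nrow ∧ y < ncol then [(x + 1, y)] else []) ++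
  (if 0 < x ∧ x - 1 < nrow ∧ y < ncol then [(x - 1, y)] else []) ++
  (if x < nrow ∧ y + 1 < ncol then [(x, y + 1)] else []) ++
  (if 0 < y ∧ x < nrow ∧ y - 1 < ncol then [(x, y - 1)] else [])

-- B's `nxt = comp | {in-bounds 1-neighbours of comp}` (Python sets of pairs become Finsets — exact)
def expand (m : List (List Int)) (nrow ncol : Nat)
    (comp : Finset (Nat × Nat)) : Finset (Nat × Nat) :=
  comp ∪ comp.biUnion
    (fun p => ((nbrs nrow ncol p.1 p.2).filter (fun q => matOne m q.1 q.2)).toFinset)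

-- B's `while True: ... if nxt == comp: break` loop, with fuel (nrow*ncol is proved sufficient)
def saturate (m : List (List Int)) (nrow ncol : Nat) :
    Nat → Finset (Nat × Nat) → Finset (Nat × Nat)
  | 0, comp => comp
  | f + 1, comp =>
    let nxt := expand m nrow ncol comp
    if nxt = comp then comp else saturate m nrow ncol f nxt

-- body of B's nested loop; state = (done, best)
def cellB (m : List (List Int)) (nrow ncol : Nat)
    (st : Finset (Nat × Nat) × Int) (r c : Nat) : Finset (Nat × Nat) × Int :=
  if matOne m r c ∧ (r, c) ∉ st.1 then
    let comp := saturate m nrow ncol (nrow * ncol) {(r, c)}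
    (st.1 ∪ comp, max st.2 (comp.card : Int))
  else st

def max_rect_alt (mat : Option (List (List Int))) : Int :=
  match mat with
  | none => 0
  | some m =>
    let nrow := m.length
    let ncol := (m.headD []).length
    ((List.range nrow).foldl
      (fun st r => (List.range ncol).foldl (fun st c => cellB m nrow ncol st r c) st)
      (∅, 0)).2

-- ===== PRECONDITION & SPEC =====

-- Pre_ excludes exactly the inputs where A raises IndexError: the empty matrix (whose first row
-- does not exist) and matrices having some row shorter than the first row (the scan indexes
-- every mat[r][c] with c < ncol); B raises there too.
def Pre_max_rect (mat : Option (List (List Int))) : Prop :=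
  match mat with
  | none => True
  | some m => m ≠ [] ∧ ∀ row ∈ m, (m.headD []).length ≤ row.length

instance (mat : Option (List (List Int))) : Decidable (Pre_max_rect mat) := by
  unfold Pre_max_rect; cases mat <;> infer_instance

def pvWitness_max_rect : Option (List (List Int)) := some [[1, 1, 0], [0, 1, 0]]

def Spec_max_rect (mat : Option (List (List Int))) (out : Int) : Prop := out = max_rect_alt mat
instance (mat : Option (List (List Int))) (out : Int) : Decidable (Spec_max_rect mat out) := by
  unfold Spec_max_rect; infer_instance

-- ===== CLAIM (what is proved, stated in full; the proofs are below) =====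
def Claim_equal_max_rect : Prop :=
  ∀ (mat : Option (List (List Int))), Dom_max_rect mat → Pre_max_rect mat →
    Spec_max_rect mat (max_rect mat)

-- ===== LEMMAS AND PROOFS =====

-- cell p is in bounds and holds a 1
def good (m : List (List Int)) (nrow ncol : Nat) (p : Nat × Nat) : Prop :=
  p.1 < nrow ∧ p.2 < ncol ∧ matOne m p.1 p.2

-- 4-adjacency on the grid
def adjacent (p q : Nat × Nat) : Prop :=
  (q.1 = p.1 + 1 ∧ q.2 = p.2) ∨ (p.1 = q.1 + 1 ∧ q.2 = p.2) ∨
  (q.2 = p.2 + 1 ∧ q.1 = p.1) ∨ (p.2 = q.2 + 1 ∧ q.1 = p.1)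

-- S is closed under stepping to good neighbours
def closedU (m : List (List Int)) (nrow ncol : Nat) (S : Finset (Nat × Nat)) : Prop :=
  ∀ p ∈ S, ∀ q, adjacent p q → good m nrow ncol q → q ∈ S

lemma adjacent_symm {p q : Nat × Nat} (h : adjacent p q) : adjacent q p := by
  unfold adjacent at *; omega

lemma mem_nbrs {nrow ncol x y : Nat} {q : Nat × Nat} :
    q ∈ nbrs nrow ncol x y ↔ adjacent (x, y) q ∧ q.1 < nrow ∧ q.2 < ncol := by
  obtain ⟨a, b⟩ := q
  simp only [nbrs, adjacent, List.mem_append, List.mem_ite_nil_right, List.mem_singleton,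
    Prod.mk.injEq]
  omega

lemma mem_expand {m : List (List Int)} {nrow ncol : Nat} {comp : Finset (Nat × Nat)}
    {q : Nat × Nat} :
    q ∈ expand m nrow ncol comp ↔
      q ∈ comp ∨ ∃ p ∈ comp, adjacent p q ∧ good m nrow ncol q := by
  simp only [expand, Finset.mem_union, Finset.mem_biUnion, List.mem_toFinset, List.mem_filter,
    mem_nbrs, good]
  constructor
  · rintro (h | ⟨p, hp, ⟨hadj, h1, h2⟩, hone⟩)
    · exact Or.inl h
    · exact Or.inr ⟨p, hp, hadj, h1, h2, hone⟩
  · rintro (h | ⟨p, hp, hadj, h1, h2, hone⟩)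
    · exact Or.inl h
    · exact Or.inr ⟨p, hp, ⟨hadj, h1, h2⟩, hone⟩

lemma subset_expand {m : List (List Int)} {nrow ncol : Nat} {comp : Finset (Nat × Nat)} :
    comp ⊆ expand m nrow ncol comp :=
  Finset.subset_union_left

lemma expand_subset {m : List (List Int)} {nrow ncol : Nat} {comp S : Finset (Nat × Nat)}
    (hsub : comp ⊆ S) (hcl : closedU m nrow ncol S) : expand m nrow ncol comp ⊆ S := by
  intro q hq
  rcases mem_expand.1 hq with h | ⟨p, hp, hadj, hg⟩
  · exact hsub h
  · exact hcl p (hsub hp) q hadj hg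

lemma expand_good {m : List (List Int)} {nrow ncol : Nat} {comp : Finset (Nat × Nat)}
    (hg : ∀ p ∈ comp, good m nrow ncol p) :
    ∀ p ∈ expand m nrow ncol comp, good m nrow ncol p := by
  intro p hp
  rcases mem_expand.1 hp with hp | ⟨_, _, _, h⟩
  · exact hg p hp
  · exact h

lemma sat_sup {m : List (List Int)} {nrow ncol : Nat} :
    ∀ (f : Nat) (comp : Finset (Nat × Nat)), comp ⊆ saturate m nrow ncol f comp := by
  intro f
  induction f with
  | zero => intro comp; simp [saturate]
  | succ f ih =>
    intro comp
    simp only [saturate]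
    split
    · exact Finset.Subset.refl _
    · exact subset_expand.trans (ih _)

lemma sat_min {m : List (List Int)} {nrow ncol : Nat} {S : Finset (Nat × Nat)}
    (hcl : closedU m nrow ncol S) :
    ∀ (f : Nat) (comp : Finset (Nat × Nat)), comp ⊆ S → saturate m nrow ncol f comp ⊆ S := by
  intro f
  induction f with
  | zero => intro comp h; simpa [saturate] using h
  | succ f ih =>
    intro comp h
    simp only [saturate]
    split
    · exact h
    · exact ih _ (expand_subset h hcl)

lemma sat_good {m : List (List Int)} {nrow ncol : Nat} :
    ∀ (f : Nat) (comp : Finset (Nat × Nat)), (∀ p ∈ comp, good m nrow ncol p) →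
      ∀ p ∈ saturate m nrow ncol f comp, good m nrow ncol p := by
  intro f
  induction f with
  | zero => intro comp h; simpa [saturate] using h
  | succ f ih =>
    intro comp h
    simp only [saturate]
    split
    · exact h
    · exact ih _ (expand_good h)

lemma good_card_le {m : List (List Int)} {nrow ncol : Nat} {S : Finset (Nat × Nat)}
    (h : ∀ p ∈ S, good m nrow ncol p) : S.card ≤ nrow * ncol := by
  have hsub : S ⊆ Finset.range nrow ×ˢ Finset.range ncol := by
    intro p hp
    rcases h p hp with ⟨h1, h2, _⟩
    simp [Finset.mem_product, h1, h2]
  calc S.card ≤ (Finset.range nrow ×ˢ Finset.range ncol).card := Finset.card_le_card hsub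
    _ = nrow * ncol := by simp

lemma sat_fix {m : List (List Int)} {nrow ncol : Nat} :
    ∀ (f : Nat) (comp : Finset (Nat × Nat)), (∀ p ∈ comp, good m nrow ncol p) →
      nrow * ncol ≤ comp.card + f →
      expand m nrow ncol (saturate m nrow ncol f comp) = saturate m nrow ncol f comp := by
  intro f
  induction f with
  | zero =>
    intro comp hg hcard
    simp only [saturate]
    have h1 : (expand m nrow ncol comp).card ≤ nrow * ncol := good_card_le (expand_good hg)
    exact (Finset.eq_of_subset_of_card_le subset_expand (by omega)).symm
  | succ f ih =>
    intro comp hg hcard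
    simp only [saturate]
    split
    · next heq => exact heq
    · next hne =>
      have hlt : comp.card < (expand m nrow ncol comp).card :=
        Finset.card_lt_card (lt_of_le_of_ne subset_expand (fun h => hne h.symm))
      exact ih _ (expand_good hg) (by omega)

lemma sat_closed {m : List (List Int)} {nrow ncol : Nat} {F : Finset (Nat × Nat)}
    (hfix : expand m nrow ncol F = F) : closedU m nrow ncol F := by
  intro p hp q hadj hg
  have : q ∈ expand m nrow ncol F := mem_expand.2 (Or.inr ⟨p, hp, hadj, hg⟩)
  rwa [hfix] at this

-- the set saturated from a start avoids any closed set not containing the start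
lemma sat_disjoint {m : List (List Int)} {nrow ncol : Nat} {v0 : Finset (Nat × Nat)}
    {s : Nat × Nat} {f : Nat}
    (hv0 : closedU m nrow ncol v0) (hs : s ∉ v0)
    (hFg : ∀ p ∈ saturate m nrow ncol f {s}, good m nrow ncol p)
    (hFc : closedU m nrow ncol (saturate m nrow ncol f {s})) :
    ∀ p ∈ saturate m nrow ncol f {s}, p ∉ v0 := by
  have hmin : saturate m nrow ncol f {s} ⊆ saturate m nrow ncol f {s} \ v0 := by
    apply sat_min
    · intro p hp q hadj hg
      rcases Finset.mem_sdiff.1 hp with ⟨hpF, hpv0⟩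
      refine Finset.mem_sdiff.2 ⟨hFc p hpF q hadj hg, ?_⟩
      intro hqv0
      exact hpv0 (hv0 q hqv0 p (adjacent_symm hadj) (hFg p hpF))
    · intro p hp
      rcases Finset.mem_singleton.1 hp with rfl
      exact Finset.mem_sdiff.2 ⟨sat_sup f {p} (Finset.mem_singleton_self p), hs⟩
  intro p hp
  exact (Finset.mem_sdiff.1 (hmin hp)).2

-- what one guarded enqueue-and-mark step does, given the queue/visited invariants
lemma push_spec (F : Finset (Nat × Nat)) (c : Prop) [Decidable c] (y : Nat × Nat)
    (st : List (Nat × Nat) × Finset (Nat × Nat))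
    (hNd : st.1.Nodup) (hqv : ∀ p ∈ st.1, p ∈ st.2) (hqF : ∀ p ∈ st.1, p ∈ F)
    (hyF : c → y ∈ F) :
    (push c y st).1.Nodup ∧ (∀ p ∈ (push c y st).1, p ∈ (push c y st).2) ∧
    (∀ p ∈ (push c y st).1, p ∈ F) ∧ st.2 ⊆ (push c y st).2 ∧
    (∀ p ∈ st.1, p ∈ (push c y st).1) ∧
    (∀ p ∈ (push c y st).2, p ∈ st.2 ∨ p ∈ (push c y st).1) ∧
    (c → y ∈ (push c y st).2) ∧
    (((F \ (push c y st).2).card : Int) + (push c y st).1.length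
      = ((F \ st.2).card : Int) + st.1.length) ∧
    st.1.length ≤ (push c y st).1.length := by
  unfold push
  by_cases h : c ∧ y ∉ st.2
  · have hyF' : y ∈ F := hyF h.1
    have hyq : y ∉ st.1 := fun hy => h.2 (hqv y hy)
    simp only [if_pos h]
    refine ⟨?_, ?_, ?_, Finset.subset_insert _ _, ?_, ?_, ?_, ?_, ?_⟩
    · exact List.Nodup.append hNd (List.nodup_singleton y) (by simp [hyq])
    · intro p hp
      rcases List.mem_append.1 hp with hp | hp
      · exact Finset.mem_insert_of_mem (hqv p hp)
      · rcases List.mem_singleton.1 hp with rfl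
        exact Finset.mem_insert_self _ _
    · intro p hp
      rcases List.mem_append.1 hp with hp | hp
      · exact hqF p hp
      · rcases List.mem_singleton.1 hp with rfl; exact hyF'
    · intro p hp; exact List.mem_append_left _ hp
    · intro p hp
      rcases Finset.mem_insert.1 hp with rfl | hp
      · exact Or.inr (List.mem_append_right _ (List.mem_singleton_self p))
      · exact Or.inl hp
    · intro _; exact Finset.mem_insert_self _ _
    · have hmem : y ∈ F \ st.2 := Finset.mem_sdiff.2 ⟨hyF', h.2⟩
      have h1 : F \ insert y st.2 = (F \ st.2).erase y := Finset.sdiff_insert _ _ _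
      have h2 : ((F \ st.2).erase y).card = (F \ st.2).card - 1 :=
        Finset.card_erase_of_mem hmem
      have h3 : 1 ≤ (F \ st.2).card := Finset.card_pos.2 ⟨y, hmem⟩
      rw [h1]
      simp only [List.length_append, List.length_singleton]
      omega
    · simp
  · simp only [if_neg h]
    refine ⟨hNd, hqv, hqF, Finset.Subset.refl _, fun p hp => hp, fun p hp => Or.inl hp, ?_,
      ?_, ?_⟩
    · intro hc
      by_contra hny
      exact h ⟨hc, hny⟩
    · trivial
    · exact le_refl _

-- A's BFS loop, run from any intermediate state whose frontier invariants hold, terminates in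
-- the given fuel and returns visited ∪ (the remaining part of F) and the matching area count.
lemma bfs_run (m : List (List Int)) (nrow ncol : Nat) (F : Finset (Nat × Nat))
    (hFg : ∀ p ∈ F, good m nrow ncol p) (hFc : closedU m nrow ncol F) :
    ∀ (fuel : Nat) (q : List (Nat × Nat)) (v : Finset (Nat × Nat)) (area : Int),
      q.Nodup → (∀ p ∈ q, p ∈ v) → (∀ p ∈ q, p ∈ F) →
      (∀ p ∈ v, p ∈ F → p ∉ q → ∀ y, adjacent p y → good m nrow ncol y → y ∈ v) →
      q.length + 2 * (F \ v).card ≤ fuel →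
      ∃ v', bfsLoop m nrow ncol fuel q v area
          = (v', area + q.length + (((F \ v).card : Int) - ((F \ v').card : Int))) ∧
        v ⊆ v' ∧ (∀ p ∈ v', p ∉ v → p ∈ F) ∧
        (∀ p ∈ v', p ∈ F → ∀ y, adjacent p y → good m nrow ncol y → y ∈ v') := by
  intro fuel
  induction fuel with
  | zero =>
    intro q v area hNd hqv hqF hfr hfuel
    have hq : q = [] := by
      cases q with
      | nil => rfl
      | cons a l => simp at hfuel
    subst hq
    refine ⟨v, ?_, Finset.Subset.refl _, fun p hp hpv => absurd hp hpv,
      fun p hp hpF y hadj hg => hfr p hp hpF (by simp) y hadj hg⟩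
    simp [bfsLoop]
  | succ f ih =>
    intro q v area hNd hqv hqF hfr hfuel
    match q with
    | [] =>
      refine ⟨v, ?_, Finset.Subset.refl _, fun p hp hpv => absurd hp hpv,
        fun p hp hpF y hadj hg => hfr p hp hpF (by simp) y hadj hg⟩
      simp [bfsLoop]
    | (row, col) :: rest =>
      have hx : (row, col) ∈ F := hqF _ (by simp)
      have hxv : (row, col) ∈ v := hqv _ (by simp)
      obtain ⟨hx1, hx2, hx3⟩ := hFg _ hx
      have hNd1 : rest.Nodup := hNd.of_cons
      have hqv1 : ∀ p ∈ rest, p ∈ v := fun p hp => hqv p (by simp [hp])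
      have hqF1 : ∀ p ∈ rest, p ∈ F := fun p hp => hqF p (by simp [hp])
      simp only [bfsLoop]
      -- the four pushes
      have hy1 : (row < nrow - 1 ∧ matOne m (row + 1) col) → (row + 1, col) ∈ F := by
        rintro ⟨hb, h1⟩
        exact hFc _ hx _ (Or.inl ⟨rfl, rfl⟩) ⟨by omega, hx2, h1⟩
      obtain ⟨N1, Q1, F1, V1, P1, M1, C1, E1, L1⟩ :=
        push_spec F (row < nrow - 1 ∧ matOne m (row + 1) col) (row + 1, col) (rest, v)
          hNd1 hqv1 hqF1 hy1
      set a1 := push (row < nrow - 1 ∧ matOne m (row + 1) col) (row + 1, col) (rest, v) with ha1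
      dsimp only at N1 Q1 F1 V1 P1 M1 C1 E1 L1
      have hy2 : (0 < row ∧ matOne m (row - 1) col) → (row - 1, col) ∈ F := by
        rintro ⟨hb, h1⟩
        exact hFc _ hx _ (Or.inr (Or.inl ⟨by omega, rfl⟩)) ⟨by omega, hx2, h1⟩
      obtain ⟨N2, Q2, F2, V2, P2, M2, C2, E2, L2⟩ :=
        push_spec F (0 < row ∧ matOne m (row - 1) col) (row - 1, col) a1 N1 Q1 F1 hy2
      set a2 := push (0 < row ∧ matOne m (row - 1) col) (row - 1, col) a1 with ha2
      have hy3 : (col < ncol - 1 ∧ matOne m row (col + 1)) → (row, col + 1) ∈ F := by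
        rintro ⟨hb, h1⟩
        exact hFc _ hx _ (Or.inr (Or.inr (Or.inl ⟨rfl, rfl⟩))) ⟨hx1, by omega, h1⟩
      obtain ⟨N3, Q3, F3, V3, P3, M3, C3, E3, L3⟩ :=
        push_spec F (col < ncol - 1 ∧ matOne m row (col + 1)) (row, col + 1) a2 N2 Q2 F2 hy3
      set a3 := push (col < ncol - 1 ∧ matOne m row (col + 1)) (row, col + 1) a2 with ha3
      have hy4 : (0 < col ∧ matOne m row (col - 1)) → (row, col - 1) ∈ F := by
        rintro ⟨hb, h1⟩
        exact hFc _ hx _ (Or.inr (Or.inr (Or.inr ⟨by omega, rfl⟩))) ⟨hx1, by omega, h1⟩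
      obtain ⟨N4, Q4, F4, V4, P4, M4, C4, E4, L4⟩ :=
        push_spec F (0 < col ∧ matOne m row (col - 1)) (row, col - 1) a3 N3 Q3 F3 hy4
      set a4 := push (0 < col ∧ matOne m row (col - 1)) (row, col - 1) a3 with ha4
      -- membership chains
      have hvsub : v ⊆ a4.2 := fun p hp => V4 (V3 (V2 (V1 hp)))
      have hqlift : ∀ p ∈ rest, p ∈ a4.1 := fun p hp => P4 _ (P3 _ (P2 _ (P1 _ hp)))
      have hmem42 : ∀ p ∈ a4.2, p ∈ v ∨ p ∈ a4.1 := by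
        intro p hp
        rcases M4 p hp with hp3 | hp
        · rcases M3 p hp3 with hp2 | hp
          · rcases M2 p hp2 with hp1 | hp
            · rcases M1 p hp1 with hpv | hp
              · exact Or.inl hpv
              · exact Or.inr (P4 _ (P3 _ (P2 _ hp)))
            · exact Or.inr (P4 _ (P3 _ hp))
          · exact Or.inr (P4 _ hp)
        · exact Or.inr hp
      -- the popped cell's good neighbours are all visited after the four pushes
      have hxdone : ∀ y, adjacent (row, col) y → good m nrow ncol y → y ∈ a4.2 := by
        rintro ⟨y1, y2⟩ hadj ⟨hg1, hg2, hg3⟩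
        rcases hadj with ⟨e1, e2⟩ | ⟨e1, e2⟩ | ⟨e1, e2⟩ | ⟨e1, e2⟩ <;>
          simp only at e1 e2 hg1 hg2 hg3
        · -- y = (row+1, col)
          have hyeq : ((y1 : Nat), y2) = ((row + 1 : Nat), col) := by
            rw [e1, e2]
          rw [hyeq]
          refine V4 (V3 (V2 (C1 ⟨by omega, ?_⟩)))
          rw [← e1, ← e2]; exact hg3
        · -- y = (row-1, col)
          have hyeq : ((y1 : Nat), y2) = ((row - 1 : Nat), col) := by
            have : y1 = row - 1 := by omega
            rw [this, e2]
          rw [hyeq]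
          refine V4 (V3 (C2 ⟨by omega, ?_⟩))
          have : row - 1 = y1 := by omega
          rw [this, ← e2]; exact hg3
        · -- y = (row, col+1)
          have hyeq : ((y1 : Nat), y2) = ((row : Nat), col + 1) := by
            rw [e1, e2]
          rw [hyeq]
          refine V4 (C3 ⟨by omega, ?_⟩)
          rw [← e1, ← e2]; exact hg3
        · -- y = (row, col-1)
          have hyeq : ((y1 : Nat), y2) = ((row : Nat), col - 1) := by
            have : y2 = col - 1 := by omega
            rw [this, e2]
          rw [hyeq]
          refine C4 ⟨by omega, ?_⟩
          have : col - 1 = y2 := by omega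
          rw [this, ← e2]; exact hg3
      -- frontier invariant for the recursive call
      have hfr4 : ∀ p ∈ a4.2, p ∈ F → p ∉ a4.1 →
          ∀ y, adjacent p y → good m nrow ncol y → y ∈ a4.2 := by
        intro p hp hpF hpq y hadj hg
        rcases hmem42 p hp with hpv | hq4
        · by_cases hpx : p = (row, col)
          · subst hpx; exact hxdone y hadj hg
          · have hprest : p ∉ rest := fun hpr => hpq (hqlift p hpr)
            have hpq0 : p ∉ (row, col) :: rest := by simp [hpx, hprest]
            exact hvsub (hfr p hpv hpF hpq0 y hadj hg)
        · exact absurd hq4 hpq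
      have hfuel4 : a4.1.length + 2 * (F \ a4.2).card ≤ f := by
        have hlen : (rest.length : Int) ≤ a4.1.length := by
          exact_mod_cast le_trans L1 (le_trans L2 (le_trans L3 L4))
        have hE : ((F \ a4.2).card : Int) + a4.1.length = ((F \ v).card : Int) + rest.length := by
          omega
        simp only [List.length_cons] at hfuel
        omega
      obtain ⟨v', heq, hsub', hnew', hcl'⟩ := ih a4.1 a4.2 (area + 1) N4 Q4 F4 hfr4 hfuel4
      refine ⟨v', ?_, fun p hp => hsub' (hvsub hp), ?_, hcl'⟩
      · rw [heq]
        have hE : ((F \ a4.2).card : Int) + a4.1.length = ((F \ v).card : Int) + rest.length := by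
          omega
        have harea : (area + 1) + (a4.1.length : Int)
            + (((F \ a4.2).card : Int) - ((F \ v').card : Int))
            = area + (((row, col) :: rest).length : Int)
            + (((F \ v).card : Int) - ((F \ v').card : Int)) := by
          simp only [List.length_cons]
          push_cast
          omega
        rw [harea]
      · intro p hp hpv
        by_cases h42 : p ∈ a4.2
        · rcases hmem42 p h42 with hpv2 | hq4
          · exact absurd hpv2 hpv
          · exact F4 p hq4
        · exact hnew' p hp h42

-- per-cell step: A's BFS and B's saturation agree and preserve closedness of the visited set
lemma cell_eq (m : List (List Int)) (nrow ncol : Nat) (st : Finset (Nat × Nat) × Int)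
    (r c : Nat) (hr : r < nrow) (hc : c < ncol) (hcl : closedU m nrow ncol st.1) :
    cellA m nrow ncol st r c = cellB m nrow ncol st r c ∧
    closedU m nrow ncol (cellA m nrow ncol st r c).1 := by
  by_cases h : matOne m r c ∧ (r, c) ∉ st.1
  · have hg0 : ∀ p ∈ ({(r, c)} : Finset (Nat × Nat)), good m nrow ncol p := by
      intro p hp
      rcases Finset.mem_singleton.1 hp with rfl
      exact ⟨hr, hc, h.1⟩
    have hFg := sat_good (m := m) (nrow := nrow) (ncol := ncol) (nrow * ncol) {(r, c)} hg0
    have hfix := sat_fix (m := m) (nrow := nrow) (ncol := ncol) (nrow * ncol) {(r, c)} hg0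
      (by simp)
    have hFc := sat_closed hfix
    set F := saturate m nrow ncol (nrow * ncol) ({(r, c)} : Finset (Nat × Nat)) with hF
    have hsF : (r, c) ∈ F := sat_sup _ _ (Finset.mem_singleton_self _)
    have hdisj := sat_disjoint hcl h.2 hFg hFc
    have hcardF : F.card ≤ nrow * ncol := good_card_le hFg
    have hfr0 : ∀ p ∈ insert (r, c) st.1, p ∈ F → p ∉ [(r, c)] →
        ∀ y, adjacent p y → good m nrow ncol y → y ∈ insert (r, c) st.1 := by
      intro p hp hpF hpq
      rcases Finset.mem_insert.1 hp with rfl | hp1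
      · exact absurd (List.mem_singleton_self _) hpq
      · exact absurd hp1 (hdisj p hpF)
    have hfuel0 : ([(r, c)] : List (Nat × Nat)).length
        + 2 * (F \ insert (r, c) st.1).card ≤ 2 * (nrow * ncol) + 1 := by
      have : (F \ insert (r, c) st.1).card ≤ F.card :=
        Finset.card_le_card (Finset.sdiff_subset)
      simp only [List.length_singleton]
      omega
    obtain ⟨v', heq, hsub, hnew, hclF⟩ := bfs_run m nrow ncol F hFg hFc
      (2 * (nrow * ncol) + 1) [(r, c)] (insert (r, c) st.1) 0
      (List.nodup_singleton _) (by simp) (by simpa using hsF) hfr0 hfuel0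
    have hclv' : closedU m nrow ncol v' := by
      intro p hp y hadj hg
      by_cases hpF : p ∈ F
      · exact hclF p hp hpF y hadj hg
      · have hpv : p ∈ insert (r, c) st.1 := by
          by_contra hnp
          exact hpF (hnew p hp hnp)
        rcases Finset.mem_insert.1 hpv with rfl | hp1
        · exact absurd hsF hpF
        · exact hsub (Finset.mem_insert_of_mem (hcl p hp1 y hadj hg))
    have hFsub : F ⊆ v' := by
      refine sat_min hclv' _ _ ?_
      intro p hp
      rcases Finset.mem_singleton.1 hp with rfl
      exact hsub (Finset.mem_insert_self _ _)
    have hveq : v' = st.1 ∪ F := by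
      apply Finset.Subset.antisymm
      · intro p hp
        by_cases hpv : p ∈ insert (r, c) st.1
        · rcases Finset.mem_insert.1 hpv with rfl | hp1
          · exact Finset.mem_union_right _ hsF
          · exact Finset.mem_union_left _ hp1
        · exact Finset.mem_union_right _ (hnew p hp hpv)
      · intro p hp
        rcases Finset.mem_union.1 hp with hp | hp
        · exact hsub (Finset.mem_insert_of_mem hp)
        · exact hFsub hp
    have hFv' : (F \ v').card = 0 := by
      rw [Finset.card_eq_zero, Finset.sdiff_eq_empty_iff_subset]
      exact hFsub
    have hFst : F \ st.1 = F := by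
      ext p
      simp only [Finset.mem_sdiff, and_iff_left_iff_imp]
      intro hp
      exact hdisj p hp
    have hFv : (F \ insert (r, c) st.1).card = F.card - 1 := by
      rw [Finset.sdiff_insert, hFst, Finset.card_erase_of_mem hsF]
    have hcard1 : 1 ≤ F.card := Finset.card_pos.2 ⟨_, hsF⟩
    have harea : (0 : Int) + (([((r : Nat), (c : Nat))] : List (Nat × Nat)).length : Int)
        + (((F \ insert (r, c) st.1).card : Int) - ((F \ v').card : Int)) = (F.card : Int) := by
      simp only [List.length_singleton]
      omega
    have hA : cellA m nrow ncol st r c = (v', max st.2 (F.card : Int)) := by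
      simp only [cellA, if_pos h, heq, harea]
    have hB : cellB m nrow ncol st r c = (st.1 ∪ F, max st.2 (F.card : Int)) := by
      simp only [cellB, if_pos h, hF]
    refine ⟨?_, ?_⟩
    · rw [hA, hB, hveq]
    · rw [hA]
      exact hclv'
  · refine ⟨by simp only [cellA, cellB, if_neg h], ?_⟩
    simp only [cellA, if_neg h]
    exact hcl

lemma fold_inner (m : List (List Int)) (nrow ncol r : Nat) (hr : r < nrow) :
    ∀ (cs : List Nat), (∀ c ∈ cs, c < ncol) → ∀ st : Finset (Nat × Nat) × Int,
      closedU m nrow ncol st.1 →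
      cs.foldl (fun st c => cellA m nrow ncol st r c) st
        = cs.foldl (fun st c => cellB m nrow ncol st r c) st ∧
      closedU m nrow ncol (cs.foldl (fun st c => cellA m nrow ncol st r c) st).1 := by
  intro cs
  induction cs with
  | nil => exact fun _ st h => ⟨rfl, h⟩
  | cons c cs ih =>
    intro hmem st hcl
    obtain ⟨heq, hcl'⟩ := cell_eq m nrow ncol st r c hr (hmem c (by simp)) hcl
    simp only [List.foldl_cons]
    rw [← heq]
    exact ih (fun c' hc' => hmem c' (by simp [hc'])) _ hcl'

lemma fold_outer (m : List (List Int)) (nrow ncol : Nat) :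
    ∀ (rs : List Nat), (∀ r ∈ rs, r < nrow) → ∀ st : Finset (Nat × Nat) × Int,
      closedU m nrow ncol st.1 →
      rs.foldl (fun st r => (List.range ncol).foldl (fun st c => cellA m nrow ncol st r c) st) st
        = rs.foldl (fun st r => (List.range ncol).foldl (fun st c => cellB m nrow ncol st r c) st) st ∧
      closedU m nrow ncol
        (rs.foldl (fun st r => (List.range ncol).foldl (fun st c => cellA m nrow ncol st r c) st) st).1 := by
  intro rs
  induction rs with
  | nil => exact fun _ st h => ⟨rfl, h⟩
  | cons r rs ih =>
    intro hmem st hcl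
    obtain ⟨heq, hcl'⟩ := fold_inner m nrow ncol r (hmem r (by simp)) (List.range ncol)
      (fun c hc => List.mem_range.1 hc) st hcl
    simp only [List.foldl_cons]
    rw [← heq]
    exact ih (fun r' hr' => hmem r' (by simp [hr'])) _ hcl'

-- ===== VERDICT (by name: the statement is the Claim_ definition above) =====
theorem max_rect_spec : Claim_equal_max_rect := by
  intro mat _ _
  unfold Spec_max_rect
  cases mat with
  | none => rfl
  | some m =>
    simp only [max_rect, max_rect_alt]
    have := fold_outer m m.length (m.headD []).length (List.range m.length)
      (fun r hr => List.mem_range.1 hr) (∅, 0)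
      (by intro p hp y _ _; exact absurd hp (Finset.notMem_empty p))
    rw [this.1]
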